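-- pv_equiv track=rewrite | github.com/chenliangguang81-eng/xiaoban-agent | engines/curiosity_engine.py | _filter_by_interests
-- ===== SOURCE A (Python) =====
-- from typing import Dict, List, Optional
--
-- def _filter_by_interests(
--     applications: List[str], interests: List[str]
-- ) -> List[str]:
--     """根据学生兴趣过滤最相关的应用"""
--     if not interests:
--         return applications
--
--     scored = []
--     for app in applications:
--         score = sum(1 for interest in interests if interest in app)
--         scored.append((score, app))
--
--     scored.sort(key=lambda x: x[0], reverse=True)
--     return [app for _, app in scored]
-- ===== SOURCE B (Python) =====
-- from typing import List
--
--
-- def _filter_by_interests(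
--     applications: List[str], interests: List[str]
-- ) -> List[str]:
--     if not interests:
--         return applications
--
--     # bucket apps by score (number of matching interests), keeping input order
--     buckets = {}
--     for app in applications:
--         score = sum(1 for interest in interests if interest in app)
--         buckets[score] = buckets.get(score, []) + [app]
--
--     # emit buckets from highest possible score down to 0
--     result = []
--     for s in range(len(interests), -1, -1):
--         result = result + buckets.get(s, [])
--     return result
-- ===== Notes on version B (the rewrite author's own statement) =====
-- stated objective: alternative
-- what changed: Replaces building (score, app) tuples and stable comparison-sorting them with a bucket distribution: a dict mapping score to apps in input order, concatenated from score len(interests) down to 0.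
import Mathlib
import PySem

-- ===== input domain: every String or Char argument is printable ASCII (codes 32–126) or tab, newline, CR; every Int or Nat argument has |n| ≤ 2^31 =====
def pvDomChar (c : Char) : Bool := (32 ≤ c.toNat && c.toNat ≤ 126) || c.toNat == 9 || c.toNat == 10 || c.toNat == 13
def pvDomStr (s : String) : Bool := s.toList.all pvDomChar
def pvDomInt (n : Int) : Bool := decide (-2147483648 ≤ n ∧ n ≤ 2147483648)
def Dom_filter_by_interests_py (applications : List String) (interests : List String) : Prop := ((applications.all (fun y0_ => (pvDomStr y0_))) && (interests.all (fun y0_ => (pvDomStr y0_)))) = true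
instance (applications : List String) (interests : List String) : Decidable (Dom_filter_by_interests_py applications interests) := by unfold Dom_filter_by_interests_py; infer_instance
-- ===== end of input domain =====

-- B replaces A's stable comparison sort of (score, app) tuples by score buckets emitted
-- from the highest possible score down to 0 (an alternative algorithm of similar cost).

-- ===== PORT A =====
-- sum(1 for interest in interests if interest in app)  (shared by both Pythons verbatim)
def pyScore (interests : List String) (app : String) : Int :=
  (interests.map (fun interest => if PySem.Str.isIn interest app then (1 : Int) else 0)).sum

def filter_by_interests_py (applications : List String) (interests : List String) : List String :=
  if interests = [] then applications
  else
    let scored : List (Int × String) :=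
      applications.foldl (fun acc app => acc ++ [(pyScore interests app, app)]) []
    (PySem.List.sorted scored (fun x => x.1) true).map (fun x => x.2)

-- ===== PORT B =====
def filter_by_interests_py_alt (applications : List String) (interests : List String) : List String :=
  if interests = [] then applications
  else
    let buckets : PySem.Dict Int (List String) :=
      applications.foldl (fun d app =>
        let score := pyScore interests app
        d.insert score (d.getD score [] ++ [app])) PySem.Dict.empty
    (PySem.List.pyRange (interests.length : Int) (-1) (-1)).foldl
      (fun result s => result ++ buckets.getD s []) []

-- ===== PRECONDITION & SPEC =====
def Spec_filter_by_interests_py (applications : List String) (interests : List String) (out : List String) : Prop := out = filter_by_interests_py_alt applications interests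
instance (applications : List String) (interests : List String) (out : List String) : Decidable (Spec_filter_by_interests_py applications interests out) := by unfold Spec_filter_by_interests_py; infer_instance

-- ===== CLAIM (what is proved, stated in full; the proofs are below) =====
def Claim_equal_filter_by_interests_py : Prop := ∀ (applications : List String) (interests : List String), Dom_filter_by_interests_py applications interests → Spec_filter_by_interests_py applications interests (filter_by_interests_py applications interests)

-- ===== LEMMAS AND PROOFS =====

theorem pyScore_eq_countP (interests : List String) (app : String) :
    pyScore interests app = (interests.countP (fun i => PySem.Str.isIn i app) : Int) := by
  simpa [pyScore] using PySem.List.sum_map_ite_one_zero (fun i => PySem.Str.isIn i app) interests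

theorem pyScore_bounds (interests : List String) (app : String) :
    0 ≤ pyScore interests app ∧ pyScore interests app ≤ (interests.length : Int) := by
  rw [pyScore_eq_countP]
  have h := List.countP_le_length (l := interests) (p := fun i => PySem.Str.isIn i app)
  constructor <;> [positivity; exact_mod_cast h]

theorem insertBy_skip {α : Type} (before : α → α → Bool) (x : α) (L1 L2 : List α)
    (h : ∀ b ∈ L1, before x b = false) :
    PySem.List.insertBy before x (L1 ++ L2) = L1 ++ PySem.List.insertBy before x L2 := by
  induction L1 with
  | nil => rfl
  | cons b L1 ih =>
      have hb := h b (by simp)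
      simp only [List.cons_append, PySem.List.insertBy, hb, Bool.false_eq_true, if_false]
      rw [ih (fun b hb => h b (by simp [hb]))]

theorem insertBy_front {α : Type} (before : α → α → Bool) (x : α) (L : List α)
    (h : ∀ b ∈ L, before x b = true) :
    PySem.List.insertBy before x L = x :: L := by
  cases L with
  | nil => rfl
  | cons b L => simp [PySem.List.insertBy, h b (by simp)]

theorem insert_into_buckets (ss : List Int) (hss : ss.Pairwise (· > ·))
    (x : Int × String) (hx : x.1 ∈ ss) (ys : List (Int × String)) :
    PySem.List.insertBy (fun a b => decide (b.1 < a.1)) x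
      (ss.flatMap (fun s => ys.filter (fun y => y.1 == s)))
    = ss.flatMap (fun s => (ys ++ [x]).filter (fun y => y.1 == s)) := by
  induction ss with
  | nil => cases hx
  | cons s ss ih =>
      rcases List.pairwise_cons.mp hss with ⟨hgt, htail⟩
      by_cases hks : x.1 = s
      · -- x belongs to the head bucket: skip past it, then land in front of the rest
        have hrest : ∀ b ∈ ss.flatMap (fun s => ys.filter (fun y => y.1 == s)),
            (fun a b => decide ((b : Int × String).1 < a.1)) x b = true := by
          intro b hb
          rcases List.mem_flatMap.mp hb with ⟨s', hs', hb'⟩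
          have hb1 : b.1 = s' := by simpa using (List.of_mem_filter hb')
          simp [hb1, hks, hgt s' hs']
        have hskip : ∀ b ∈ ys.filter (fun y => y.1 == s),
            (fun a b => decide ((b : Int × String).1 < a.1)) x b = false := by
          intro b hb
          have hb1 : b.1 = s := by simpa using (List.of_mem_filter hb)
          simp [hb1, hks]
        rw [List.flatMap_cons, insertBy_skip _ _ _ _ hskip,
            insertBy_front _ _ _ hrest, List.flatMap_cons]
        have htails : ss.flatMap (fun s' => (ys ++ [x]).filter (fun y => y.1 == s'))
            = ss.flatMap (fun s' => ys.filter (fun y => y.1 == s')) := by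
          apply List.flatMap_congr
          intro s' hs'
          have : x.1 ≠ s' := by have := hgt s' hs'; omega
          simp [List.filter_append, this]
        rw [htails]
        simp [List.filter_append, hks]
      · -- x belongs to a later bucket: head bucket untouched
        have hx' : x.1 ∈ ss := by cases hx with
          | head => exact absurd rfl hks
          | tail _ h => exact h
        have hsx : x.1 < s := hgt x.1 hx'
        have hskip : ∀ b ∈ ys.filter (fun y => y.1 == s),
            (fun a b => decide ((b : Int × String).1 < a.1)) x b = false := by
          intro b hb
          have hb1 : b.1 = s := by simpa using (List.of_mem_filter hb)
          simp [hb1]; omega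
        rw [List.flatMap_cons, insertBy_skip _ _ _ _ hskip, ih htail hx',
            List.flatMap_cons]
        have : ¬ (x.1 == s) = true := by simp [hks]
        simp [List.filter_append, hks]

theorem foldl_insertBy_eq_flatMap (ss : List Int) (hss : ss.Pairwise (· > ·))
    (xs : List (Int × String)) (hmem : ∀ x ∈ xs, x.1 ∈ ss) :
    xs.foldl (fun acc x => PySem.List.insertBy (fun a b => decide (b.1 < a.1)) x acc) []
    = ss.flatMap (fun s => xs.filter (fun y => y.1 == s)) := by
  induction xs using List.reverseRecOn with
  | nil => simp
  | append_singleton ys x ih =>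
      rw [List.foldl_append, List.foldl_cons, List.foldl_nil,
          ih (fun y hy => hmem y (by simp [hy])),
          insert_into_buckets ss hss x (hmem x (by simp)) ys]

theorem buckets_getD (interests : List String) (apps : List String)
    (d : PySem.Dict Int (List String)) (s : Int) :
    (apps.foldl (fun d app =>
        d.insert (pyScore interests app) (d.getD (pyScore interests app) [] ++ [app])) d).getD s []
    = d.getD s [] ++ apps.filter (fun app => pyScore interests app == s) := by
  induction apps generalizing d with
  | nil => simp
  | cons app apps ih =>
      rw [List.foldl_cons, ih]
      by_cases h : pyScore interests app = s
      · simp [h]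
      · have : ¬ s = pyScore interests app := fun he => h he.symm
        simp [h, PySem.Dict.getD_insert, this]

theorem pyRange_down (n : Nat) :
    PySem.List.pyRange (n : Int) (-1) (-1)
      = (List.range (n + 1)).map (fun k : Nat => (n : Int) - (k : Int)) := by
  have hc : ((((n : Int) - (-1) + -(-1) - 1) / -(-1)).toNat) = n + 1 := by
    have h1 : ((n : Int) - (-1) + -(-1) - 1) / -(-1) = (n : Int) + 1 := by norm_num
    rw [h1]; omega
  simp only [PySem.List.pyRange]
  rw [if_neg (by norm_num), if_neg (by norm_num), if_pos (by omega), hc]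
  exact List.map_congr_left (fun k _ => by ring)

theorem mem_pyRange_down (n : Nat) (s : Int) :
    s ∈ PySem.List.pyRange (n : Int) (-1) (-1) ↔ 0 ≤ s ∧ s ≤ (n : Int) := by
  rw [pyRange_down]
  simp only [List.mem_map, List.mem_range]
  constructor
  · rintro ⟨k, hk, rfl⟩; omega
  · rintro ⟨h0, hn⟩
    exact ⟨(↑n - s).toNat, by omega, by omega⟩

theorem pairwise_pyRange_down (n : Nat) :
    (PySem.List.pyRange (n : Int) (-1) (-1)).Pairwise (· > ·) := by
  rw [pyRange_down, List.pairwise_map]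
  exact (List.pairwise_lt_range).imp (fun h => by omega)

-- ===== VERDICT (by name: the statement is the Claim_ definition above) =====
theorem filter_by_interests_py_spec : Claim_equal_filter_by_interests_py := by
  intro applications interests _
  unfold Spec_filter_by_interests_py filter_by_interests_py filter_by_interests_py_alt
  by_cases hi : interests = []
  · simp [hi]
  · simp only [hi, if_false]
    set n := interests.length with hn
    set ss := PySem.List.pyRange (n : Int) (-1) (-1) with hss
    set f : String → Int × String := fun app => (pyScore interests app, app) with hf
    -- A's side
    rw [show (applications.foldl (fun acc app => acc ++ [(pyScore interests app, app)]) [])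
          = applications.map f from by
        simpa using PySem.List.foldl_append_singleton_eq_map f applications []]
    rw [PySem.List.sorted_rev_eq_foldl_insertBy]
    rw [foldl_insertBy_eq_flatMap ss (pairwise_pyRange_down n) (applications.map f)
        (by
          intro x hx
          rcases List.mem_map.mp hx with ⟨app, _, rfl⟩
          exact (mem_pyRange_down n _).mpr (pyScore_bounds interests app))]
    -- B's side
    have hB := PySem.List.foldl_append_eq_flatMap
        (g := fun s : Int =>
          (applications.foldl (fun d app =>
            d.insert (pyScore interests app) (d.getD (pyScore interests app) [] ++ [app]))
            (PySem.Dict.empty : PySem.Dict Int (List String))).getD s [])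
        (l := ss) (acc := ([] : List String))
    rw [hB, List.nil_append]
    rw [List.map_flatMap]
    apply List.flatMap_congr
    intro s _
    rw [buckets_getD interests applications PySem.Dict.empty s]
    have hfm : (applications.map f).filter (fun y => y.1 == s)
        = (applications.filter (fun app => pyScore interests app == s)).map f := by
      rw [List.filter_map]; rfl
    rw [hfm, List.map_map]
    have hid : ((fun x : Int × String => x.2) ∘ fun app => (pyScore interests app, app)) = id := rfl
    rw [hf, hid, List.map_id]
    simp [PySem.Dict.empty, PySem.Dict.getD, PySem.Dict.get?]
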